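-- pv_equiv track=rewrite | github.com/zermpinos/Advent-of-Code-2025 | Day06/solutionpt2.py | parse_problem_columns
-- ===== SOURCE A (Python) =====
-- def parse_problem_columns(grid):
--     h = len(grid)
--     w = len(grid[0])
--
--     blocks = []
--     col = w - 1
--
--     while col >= 0:
--         if all(grid[r][col] == " " for r in range(h)):
--             col -= 1
--             continue
--         end = col + 1
--         while col >= 0 and not all(grid[r][col] == " " for r in range(h)):
--             col -= 1
--         start = col + 1
--         blocks.append((start, end))
--     return blocks
-- ===== SOURCE B (Python) =====
-- def parse_problem_columns(grid):
--     w = len(grid[0])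
--     flags = [any(row[c] != " " for row in grid) for c in range(w)]
--     blocks = []
--     start = None
--     for c, f in enumerate(flags):
--         if f:
--             if start is None:
--                 start = c
--         else:
--             if start is not None:
--                 blocks.append((start, c))
--                 start = None
--     if start is not None:
--         blocks.append((start, w))
--     blocks.reverse()
--     return blocks
-- ===== Notes on version B (the rewrite author's own statement) =====
-- stated objective: alternative
-- what changed: B first builds a per-column occupancy flag table (any non-space per column), then groups maximal runs of occupied columns in a separate left-to-right pass and reverses, instead of A's right-to-left outer while loop with a nested inner while.
import Mathlib
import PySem

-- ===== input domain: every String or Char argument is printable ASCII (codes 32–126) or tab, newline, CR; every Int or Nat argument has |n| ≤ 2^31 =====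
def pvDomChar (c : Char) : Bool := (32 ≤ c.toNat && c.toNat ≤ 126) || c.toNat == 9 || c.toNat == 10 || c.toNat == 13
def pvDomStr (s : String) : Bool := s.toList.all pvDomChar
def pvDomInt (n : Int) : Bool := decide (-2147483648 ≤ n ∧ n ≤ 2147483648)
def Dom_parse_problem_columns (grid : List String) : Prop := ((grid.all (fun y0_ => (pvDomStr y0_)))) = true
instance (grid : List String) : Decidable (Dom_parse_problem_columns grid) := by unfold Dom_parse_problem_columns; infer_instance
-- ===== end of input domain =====

-- B replaces A's right-to-left nested while-loops by a per-column flag table plus a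
-- left-to-right run-grouping pass (then one reverse); same cost, different decomposition.

-- ===== PORT A =====
-- all(grid[r][col] == " " for r in range(h)); under Pre_ every index evaluated is in range
def pvAllSpaceA (grid : List String) (c : Nat) : Bool :=
  grid.all (fun s => PySem.Str.pyGet? s (c : Int) == some ' ')

-- inner while: argument n encodes col+1 (n = 0 means col = -1); returns final col + 1 = start
def pvInnerA (grid : List String) : Nat → Nat
  | 0 => 0
  | n + 1 => if pvAllSpaceA grid n then n + 1 else pvInnerA grid n

theorem pvInnerA_le (grid : List String) (n : Nat) : pvInnerA grid n ≤ n := by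
  induction n with
  | zero => simp [pvInnerA]
  | succ m ih => unfold pvInnerA; split <;> omega

-- outer while: argument n encodes col+1; blocks is the accumulator list
def pvOuterA (grid : List String) : List (Int × Int) → Nat → List (Int × Int)
  | blocks, 0 => blocks
  | blocks, n + 1 =>
    if pvAllSpaceA grid n then pvOuterA grid blocks n
    else
      let s := pvInnerA grid n
      pvOuterA grid (blocks ++ [((s : Int), (n : Int) + 1)]) s
  termination_by blocks n => n
  decreasing_by · exact Nat.lt_succ_self n
                · exact Nat.lt_succ_of_le (pvInnerA_le grid n)

-- grid[0] raises IndexError on []; Pre_ excludes that, so headD is never reached there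
def parse_problem_columns (grid : List String) : List (Int × Int) :=
  pvOuterA grid [] (grid.headD "").toList.length

-- ===== PORT B =====
-- any(row[c] != " " for row in grid)
def pvColFlag (grid : List String) (c : Nat) : Bool :=
  grid.any (fun s => !(PySem.Str.pyGet? s (c : Int) == some ' '))

-- body of B's grouping loop: state = (blocks, start); input = (c, flags[c])
def pvStepB (st : List (Int × Int) × Option Int) (cf : Int × Bool) :
    List (Int × Int) × Option Int :=
  match st, cf with
  | (blocks, start?), (c, f) =>
    if f then
      match start? with
      | none => (blocks, some c)
      | some s => (blocks, some s)
    else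
      match start? with
      | some s => (blocks ++ [(s, c)], none)
      | none => (blocks, none)

def parse_problem_columns_alt (grid : List String) : List (Int × Int) :=
  let w := (grid.headD "").toList.length
  let flags := (List.range w).map (fun c => pvColFlag grid c)
  let st := (PySem.List.enumerate flags 0).foldl pvStepB ([], none)
  let blocks :=
    match st.2 with
    | some s => st.1 ++ [(s, (w : Int))]
    | none => st.1
  blocks.reverse

-- ===== PRECONDITION & SPEC =====
-- Column c never raises: whenever Python's short-circuiting all()/any() reaches row r at
-- column c (all earlier rows hold ' ' there), row r is long enough.
def pvColOk (grid : List String) (c : Nat) : Prop :=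
  ∀ r ∈ List.range grid.length,
    ((List.range r).all (fun r' => ((grid.getD r' "").toList[c]? == some ' ')) = true) →
    c < (grid.getD r "").toList.length

-- Exactly the inputs where the Python A returns (no IndexError): a nonempty grid on which
-- no column check runs off the end of a row before meeting a non-space character.
def Pre_parse_problem_columns (grid : List String) : Prop :=
  grid ≠ [] ∧ ∀ c ∈ List.range (grid.headD "").toList.length, pvColOk grid c

instance (grid : List String) : Decidable (Pre_parse_problem_columns grid) := by
  unfold Pre_parse_problem_columns pvColOk; infer_instance

def pvWitness_parse_problem_columns : List String := ["ab", " b"]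

def Spec_parse_problem_columns (grid : List String) (out : List (Int × Int)) : Prop := out = parse_problem_columns_alt grid
instance (grid : List String) (out : List (Int × Int)) : Decidable (Spec_parse_problem_columns grid out) := by unfold Spec_parse_problem_columns; infer_instance

-- ===== CLAIM (what is proved, stated in full; the proofs are below) =====
def Claim_equal_parse_problem_columns : Prop := ∀ (grid : List String), Dom_parse_problem_columns grid → Pre_parse_problem_columns grid → Spec_parse_problem_columns grid (parse_problem_columns grid)

-- ===== LEMMAS AND PROOFS =====

theorem pvInnerA_succ (grid : List String) (n : Nat) :
    pvInnerA grid (n + 1) = if pvAllSpaceA grid n then n + 1 else pvInnerA grid n := rfl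

theorem pvOuterA_succ (grid : List String) (blocks : List (Int × Int)) (n : Nat) :
    pvOuterA grid blocks (n + 1) =
      if pvAllSpaceA grid n then pvOuterA grid blocks n
      else pvOuterA grid (blocks ++ [((pvInnerA grid n : Int), (n : Int) + 1)]) (pvInnerA grid n) := by
  rw [pvOuterA]

theorem pvFlag_not_allSpace (grid : List String) (c : Nat) :
    pvColFlag grid c = !pvAllSpaceA grid c := by
  simp [pvColFlag, pvAllSpaceA, List.all_eq_not_any_not]

-- accumulator lemma for A's outer loop
theorem pvOuterA_acc (grid : List String) :
    ∀ n blocks, pvOuterA grid blocks n = blocks ++ pvOuterA grid [] n := by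
  intro n
  induction n using Nat.strong_induction_on with
  | _ n ih =>
    intro blocks
    match n with
    | 0 => simp [pvOuterA]
    | Nat.succ m =>
      rw [pvOuterA_succ, pvOuterA_succ]
      by_cases h : pvAllSpaceA grid m = true
      · simp only [h, if_true]
        exact ih m (Nat.lt_succ_self m) blocks
      · simp only [h, if_false, Bool.false_eq_true]
        rw [ih (pvInnerA grid m) (Nat.lt_succ_of_le (pvInnerA_le grid m)),
            ih (pvInnerA grid m) (Nat.lt_succ_of_le (pvInnerA_le grid m)) ([] ++ _)]
        simp

theorem pvInnerA_bdry (grid : List String) (n : Nat)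
    (h : n = 0 ∨ pvColFlag grid (n - 1) = false) : pvInnerA grid n = n := by
  match n with
  | 0 => rfl
  | Nat.succ m =>
    rcases h with h | h
    · omega
    · rw [pvFlag_not_allSpace] at h
      simp only [Nat.succ_sub_one] at h
      have hx : pvAllSpaceA grid m = true := by
        cases hx : pvAllSpaceA grid m <;> simp [hx] at h ⊢
      rw [pvInnerA_succ]
      simp [hx]

-- the enumerated flag prefix of length n
def pvEn (grid : List String) (n : Nat) : List (Int × Bool) :=
  PySem.List.enumerate ((List.range n).map (fun c => pvColFlag grid c)) 0

theorem pvEn_succ (grid : List String) (n : Nat) :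
    pvEn grid (n + 1) = pvEn grid n ++ [((n : Int), pvColFlag grid n)] := by
  simp [pvEn, List.range_succ, PySem.List.enumerate_append, PySem.List.enumerate_cons, PySem.List.enumerate_nil]

-- the invariant of B's fold, phrased with A's loops as the reference value
theorem pvFold_invariant (grid : List String) (n : Nat) :
    (pvEn grid n).foldl pvStepB ([], none) =
      if n = 0 ∨ pvColFlag grid (n - 1) = false then
        ((pvOuterA grid [] n).reverse, none)
      else
        ((pvOuterA grid [] (pvInnerA grid n)).reverse, some ((pvInnerA grid n : Nat) : Int)) := by
  induction n with
  | zero => simp [pvEn, PySem.List.enumerate_nil, pvOuterA]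
  | succ m ih =>
    rw [pvEn_succ, List.foldl_append, ih]
    by_cases hf : pvColFlag grid m = true
    · -- current column occupied
      have hsp : pvAllSpaceA grid m = false := by
        rw [pvFlag_not_allSpace] at hf
        cases hx : pvAllSpaceA grid m <;> simp [hx] at hf ⊢
      have hinner : pvInnerA grid (m + 1) = pvInnerA grid m := by
        rw [pvInnerA_succ]; simp [hsp]
      have hnb : ¬ (m + 1 = 0 ∨ pvColFlag grid (m + 1 - 1) = false) := by simp [hf]
      by_cases hb : m = 0 ∨ pvColFlag grid (m - 1) = false
      · -- previous state: boundary, start = none → start := m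
        have hm : pvInnerA grid m = m := pvInnerA_bdry grid m hb
        simp only [hb, if_true, List.foldl_cons, List.foldl_nil, pvStepB, hf, if_true]
        simp only [hnb, if_false, hinner, hm]
      · -- previous state: inside a run; unchanged
        simp only [hb, if_false, List.foldl_cons, List.foldl_nil, pvStepB, hf, if_true]
        simp only [hnb, if_false, hinner]
    · -- current column empty
      have hf' : pvColFlag grid m = false := by cases hx : pvColFlag grid m <;> simp_all
      have hsp : pvAllSpaceA grid m = true := by
        rw [pvFlag_not_allSpace] at hf'
        cases hx : pvAllSpaceA grid m <;> simp [hx] at hf' ⊢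
      have hA : pvOuterA grid [] (m + 1) = pvOuterA grid [] m := by
        rw [pvOuterA_succ]; simp [hsp]
      have hb1 : (m + 1 = 0 ∨ pvColFlag grid (m + 1 - 1) = false) := by
        right; simpa using hf'
      by_cases hb : m = 0 ∨ pvColFlag grid (m - 1) = false
      · simp only [hb, if_true, List.foldl_cons, List.foldl_nil, pvStepB, hf', if_false,
          Bool.false_eq_true, hb1, hA]
      · -- run ends here: blocks += [(start, m)]
        simp only [hb, if_false, List.foldl_cons, List.foldl_nil, pvStepB, hf',
          Bool.false_eq_true, if_false, hb1, if_true, hA]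
        -- show (A (m+1)).reverse = (A s).reverse ++ [(s, m)]
        have hm1 : 1 ≤ m := by
          rcases Nat.eq_zero_or_pos m with h | h
          · exact absurd (Or.inl h) hb
          · omega
        obtain ⟨k, rfl⟩ : ∃ k, m = k + 1 := ⟨m - 1, by omega⟩
        have hfk : pvColFlag grid k = true := by
          rw [not_or] at hb; simpa using hb.2
        have hspk : pvAllSpaceA grid k = false := by
          rw [pvFlag_not_allSpace] at hfk
          cases hx : pvAllSpaceA grid k <;> simp [hx] at hfk ⊢
        have hAm : pvOuterA grid [] (k + 1) =
            ((pvInnerA grid k : Int), (k : Int) + 1) :: pvOuterA grid [] (pvInnerA grid k) := by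
          rw [pvOuterA_succ]
          simp only [hspk, Bool.false_eq_true, if_false]
          rw [pvOuterA_acc]
          simp
        have hik : pvInnerA grid (k + 1) = pvInnerA grid k := by
          rw [pvInnerA_succ]; simp [hspk]
        rw [hAm, hik]
        simp

-- ===== VERDICT (by name: the statement is the Claim_ definition above) =====
theorem parse_problem_columns_spec : Claim_equal_parse_problem_columns := by
  intro grid _ _
  unfold Spec_parse_problem_columns parse_problem_columns parse_problem_columns_alt
  dsimp only
  rw [show PySem.List.enumerate ((List.range (grid.headD "").toList.length).map
        (fun c => pvColFlag grid c)) 0 = pvEn grid (grid.headD "").toList.length from rfl,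
      pvFold_invariant grid (grid.headD "").toList.length]
  generalize (grid.headD "").toList.length = w
  by_cases hb : w = 0 ∨ pvColFlag grid (w - 1) = false
  · simp [hb]
  · simp only [hb, if_false]
    obtain ⟨k, rfl⟩ : ∃ k, w = k + 1 := ⟨w - 1, by omega⟩
    have hfk : pvColFlag grid k = true := by
      rw [not_or] at hb; simpa using hb.2
    have hspk : pvAllSpaceA grid k = false := by
      rw [pvFlag_not_allSpace] at hfk
      cases hx : pvAllSpaceA grid k <;> simp [hx] at hfk ⊢
    have hAm : pvOuterA grid [] (k + 1) =
        ((pvInnerA grid k : Int), (k : Int) + 1) :: pvOuterA grid [] (pvInnerA grid k) := by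
      rw [pvOuterA_succ]
      simp only [hspk, Bool.false_eq_true, if_false]
      rw [pvOuterA_acc]
      simp
    have hik : pvInnerA grid (k + 1) = pvInnerA grid k := by
      rw [pvInnerA_succ]; simp [hspk]
    rw [hAm, hik]
    simp
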